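-- pv_equiv track=rewrite | github.com/carlzimmerman/zimmerman-formula | research/proof_attempt/oxDNA_icosahedron_setup.py | generate_oxdna_topology
-- ===== SOURCE A (Python) =====
-- from typing import List, Tuple, Dict
--
-- def generate_oxdna_topology(routing: Dict) -> str:
--     """
--     Generate oxDNA topology file.
--
--     Format:
--     Line 1: <num_nucleotides> <num_strands>
--     Subsequent lines: <strand_id> <base> <3'_neighbor> <5'_neighbor>
--     """
--
--     bp_per_edge = routing['bp_per_edge']
--     num_edges = routing['num_edges']
--
--     # Each edge has 2 strands (complementary)
--     num_strands = num_edges * 2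
--     num_nucleotides = num_strands * bp_per_edge
--
--     topology_lines = [f"{num_nucleotides} {num_strands}"]
--
--     nucleotide_id = 0
--     for edge_idx in range(num_edges):
--         # Forward strand
--         strand_id = edge_idx * 2 + 1
--         for pos in range(bp_per_edge):
--             # Use simple A-T alternation for placeholder
--             base = 'A' if pos % 2 == 0 else 'T'
--
--             if pos == 0:
--                 neighbor_3 = -1  # 3' end
--             else:
--                 neighbor_3 = nucleotide_id - 1
--
--             if pos == bp_per_edge - 1:
--                 neighbor_5 = -1  # 5' end
--             else:
--                 neighbor_5 = nucleotide_id + 1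
--
--             topology_lines.append(f"{strand_id} {base} {neighbor_3} {neighbor_5}")
--             nucleotide_id += 1
--
--         # Reverse complementary strand
--         strand_id = edge_idx * 2 + 2
--         for pos in range(bp_per_edge):
--             # Complement of A-T pattern
--             base = 'T' if pos % 2 == 0 else 'A'
--
--             if pos == 0:
--                 neighbor_3 = -1
--             else:
--                 neighbor_3 = nucleotide_id - 1
--
--             if pos == bp_per_edge - 1:
--                 neighbor_5 = -1
--             else:
--                 neighbor_5 = nucleotide_id + 1
--
--             topology_lines.append(f"{strand_id} {base} {neighbor_3} {neighbor_5}")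
--             nucleotide_id += 1
--
--     return '\n'.join(topology_lines)
-- ===== SOURCE B (Python) =====
-- def generate_oxdna_topology(routing):
--     """Columnar build: construct the four per-nucleotide columns (strand id,
--     base, 3' neighbor, 5' neighbor) as whole sequences -- the base column by
--     tiling the 'AT'/'TA' pattern strings -- then zip them into lines."""
--     bp = routing['bp_per_edge']
--     ne = routing['num_edges']
--     ns = ne * 2
--     nn = ns * bp
--     strands = [s for s in range(1, ns + 1) for _ in range(bp)]
--     bases = (('AT' * bp)[:bp] + ('TA' * bp)[:bp]) * ne
--     n3 = [-1 if i % bp == 0 else i - 1 for i in range(nn)]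
--     n5 = [-1 if i % bp == bp - 1 else i + 1 for i in range(nn)]
--     lines = [f"{nn} {ns}"]
--     lines += [f"{s} {b} {a} {c}" for s, b, a, c in zip(strands, bases, n3, n5)]
--     return '\n'.join(lines)
-- ===== Notes on version B (the rewrite author's own statement) =====
-- stated objective: alternative
-- what changed: Replaces A's nested per-edge/per-position loops with a running nucleotide counter by a columnar build: the four per-nucleotide columns (strand ids by repetition, bases by tiling the 'AT'/'TA' pattern strings, the two neighbor columns from the flat index) are constructed as whole sequences in separate passes and then zipped into lines.
import Mathlib
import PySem

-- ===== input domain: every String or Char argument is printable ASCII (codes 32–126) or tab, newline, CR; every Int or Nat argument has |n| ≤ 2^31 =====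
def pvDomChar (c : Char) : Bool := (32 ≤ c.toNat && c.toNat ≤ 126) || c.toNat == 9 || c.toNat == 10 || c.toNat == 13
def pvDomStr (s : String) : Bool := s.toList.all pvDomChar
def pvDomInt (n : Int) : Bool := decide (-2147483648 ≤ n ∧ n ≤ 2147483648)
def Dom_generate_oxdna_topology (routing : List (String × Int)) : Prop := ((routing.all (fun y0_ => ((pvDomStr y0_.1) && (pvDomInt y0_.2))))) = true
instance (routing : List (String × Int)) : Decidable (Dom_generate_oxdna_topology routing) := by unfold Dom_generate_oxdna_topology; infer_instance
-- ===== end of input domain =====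

-- B builds the topology column-wise (strand ids, bases by tiling pattern strings, the
-- two neighbor columns from the flat index) and zips the columns into lines, instead of
-- A's nested edge loops with a running counter; same output, no speed claim.

-- ===== PORT A =====
-- Literal port of A: nested foldl over edges, each edge running two position folds
-- carrying (lines, nucleotide_id). Dict lookup = first match; getD 0 is unreachable under Pre_.
def generate_oxdna_topology (routing : List (String × Int)) : String :=
  let bp_per_edge := (routing.lookup "bp_per_edge").getD 0
  let num_edges := (routing.lookup "num_edges").getD 0
  let num_strands := num_edges * 2
  let num_nucleotides := num_strands * bp_per_edge
  let header := PySem.Int.toStr num_nucleotides ++ " " ++ PySem.Int.toStr num_strands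
  let st :=
    (PySem.List.pyRange 0 num_edges 1).foldl
      (fun (st : List String × Int) edge_idx =>
        -- forward strand
        let strand_id := edge_idx * 2 + 1
        let st2 :=
          (PySem.List.pyRange 0 bp_per_edge 1).foldl
            (fun (st : List String × Int) pos =>
              let base := if PySem.Int.mod pos 2 = 0 then "A" else "T"
              let neighbor_3 := if pos = 0 then (-1 : Int) else st.2 - 1
              let neighbor_5 := if pos = bp_per_edge - 1 then (-1 : Int) else st.2 + 1
              (st.1 ++ [PySem.Int.toStr strand_id ++ " " ++ base ++ " " ++
                        PySem.Int.toStr neighbor_3 ++ " " ++ PySem.Int.toStr neighbor_5],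
               st.2 + 1)) st
        -- reverse complementary strand
        let strand_id2 := edge_idx * 2 + 2
        (PySem.List.pyRange 0 bp_per_edge 1).foldl
          (fun (st : List String × Int) pos =>
            let base := if PySem.Int.mod pos 2 = 0 then "T" else "A"
            let neighbor_3 := if pos = 0 then (-1 : Int) else st.2 - 1
            let neighbor_5 := if pos = bp_per_edge - 1 then (-1 : Int) else st.2 + 1
            (st.1 ++ [PySem.Int.toStr strand_id2 ++ " " ++ base ++ " " ++
                      PySem.Int.toStr neighbor_3 ++ " " ++ PySem.Int.toStr neighbor_5],
             st.2 + 1)) st2)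
      ([header], 0)
  PySem.Str.join "\n" st.1

-- ===== PORT B =====
-- Hand port of Python's 4-ary zip (exact: truncates at the shortest list).
def zip4 {α β γ δ : Type} : List α → List β → List γ → List δ → List (α × β × γ × δ)
  | a :: as, b :: bs, c :: cs, d :: ds => (a, b, c, d) :: zip4 as bs cs ds
  | _, _, _, _ => []

-- Literal port of B: build the four per-nucleotide columns as whole sequences
-- (strand ids by repetition, bases by tiling 'AT'/'TA', neighbors from the flat
-- index), then zip them into lines.  Python str * int = PySem.List.pyRepeat on
-- the char list, s[:bp] = PySem.List.slice.
def generate_oxdna_topology_alt (routing : List (String × Int)) : String :=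
  let bp := (routing.lookup "bp_per_edge").getD 0
  let ne := (routing.lookup "num_edges").getD 0
  let ns := ne * 2
  let nn := ns * bp
  let strands := (PySem.List.pyRange 1 (ns + 1) 1).flatMap
      (fun s => (PySem.List.pyRange 0 bp 1).map (fun _ => s))
  let bases := PySem.List.pyRepeat
      (PySem.List.slice (PySem.List.pyRepeat "AT".toList bp) none (some bp) ++
       PySem.List.slice (PySem.List.pyRepeat "TA".toList bp) none (some bp)) ne
  let n3 := (PySem.List.pyRange 0 nn 1).map
      (fun i => if PySem.Int.mod i bp = 0 then (-1 : Int) else i - 1)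
  let n5 := (PySem.List.pyRange 0 nn 1).map
      (fun i => if PySem.Int.mod i bp = bp - 1 then (-1 : Int) else i + 1)
  let lines := (PySem.Int.toStr nn ++ " " ++ PySem.Int.toStr ns) ::
      (zip4 strands bases n3 n5).map (fun t =>
        PySem.Int.toStr t.1 ++ " " ++ String.singleton t.2.1 ++ " " ++
        PySem.Int.toStr t.2.2.1 ++ " " ++ PySem.Int.toStr t.2.2.2)
  PySem.Str.join "\n" lines

-- ===== PRECONDITION & SPEC =====
-- Pre_ excludes exactly the inputs on which Python A raises KeyError: a routing dict
-- missing the key 'bp_per_edge' or the key 'num_edges'.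
def Pre_generate_oxdna_topology (routing : List (String × Int)) : Prop :=
  (routing.lookup "bp_per_edge").isSome ∧ (routing.lookup "num_edges").isSome
instance (routing : List (String × Int)) : Decidable (Pre_generate_oxdna_topology routing) := by
  unfold Pre_generate_oxdna_topology; infer_instance

def pvWitness_generate_oxdna_topology : (List (String × Int)) :=
  [("bp_per_edge", 2), ("num_edges", 1)]

def Spec_generate_oxdna_topology (routing : List (String × Int)) (out : String) : Prop := out = generate_oxdna_topology_alt routing
instance (routing : List (String × Int)) (out : String) : Decidable (Spec_generate_oxdna_topology routing out) := by unfold Spec_generate_oxdna_topology; infer_instance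

-- ===== CLAIM (what is proved, stated in full; the proofs are below) =====
def Claim_equal_generate_oxdna_topology : Prop := ∀ (routing : List (String × Int)), Dom_generate_oxdna_topology routing → Pre_generate_oxdna_topology routing → Spec_generate_oxdna_topology routing (generate_oxdna_topology routing)

-- ===== LEMMAS AND PROOFS =====

-- The common line shape both sides are reduced to.
def lineB (bp s pos : Int) : String :=
  PySem.Int.toStr (s + 1) ++ " " ++
  (if PySem.Int.mod (s + pos) 2 = 0 then "A" else "T") ++ " " ++
  PySem.Int.toStr (if pos ≠ 0 then s * bp + pos - 1 else -1) ++ " " ++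
  PySem.Int.toStr (if pos = bp - 1 then -1 else s * bp + pos + 1)

def blockB (bp s : Int) : List String :=
  (PySem.List.pyRange 0 bp 1).map (lineB bp s)

-- ---------- A-side: reduce the nested folds to header :: flatMap of blocks ----------

-- Generic inner-loop shape: appending one line per position while incrementing the counter.
theorem foldNid (g : Int → Int → String) :
    ∀ (k : Nat) (c p bp : Int) (acc : List String), (bp - p).toNat = k →
      (PySem.List.pyRange p bp 1).foldl
        (fun (st : List String × Int) pos => (st.1 ++ [g pos st.2], st.2 + 1)) (acc, c + p)
      = (acc ++ (PySem.List.pyRange p bp 1).map (fun pos => g pos (c + pos)), c + p + (k : Int)) := by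
  intro k
  induction k with
  | zero =>
    intro c p bp acc h
    rw [PySem.List.pyRange_one_eq_nil (by omega)]
    simp
  | succ k ih =>
    intro c p bp acc h
    rw [PySem.List.pyRange_one_cons (by omega)]
    simp only [List.foldl_cons, List.map_cons]
    have : c + p + 1 = c + (p + 1) := by ring
    rw [this, ih c (p + 1) bp (acc ++ [g p (c + p)]) (by omega)]
    simp only [List.append_assoc, List.singleton_append, Prod.mk.injEq]
    exact ⟨trivial, by push_cast; ring⟩

-- A's forward-strand line equals the common line for even strand s.
theorem lineFwd_eq (bp s pos : Int) (hs : PySem.Int.mod s 2 = 0) :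
    PySem.Int.toStr (s + 1) ++ " " ++ (if PySem.Int.mod pos 2 = 0 then "A" else "T") ++ " " ++
      PySem.Int.toStr (if pos = 0 then -1 else s * bp + pos - 1) ++ " " ++
      PySem.Int.toStr (if pos = bp - 1 then -1 else s * bp + pos + 1)
    = lineB bp s pos := by
  unfold lineB
  have hm : ∀ a : Int, PySem.Int.mod a 2 = a % 2 := fun a => PySem.Int.mod_eq_emod_of_pos (by omega)
  simp only [hm] at hs ⊢
  have hp : (s + pos) % 2 = pos % 2 := by omega
  rw [hp, ite_not]

-- A's reverse-strand line equals the common line for odd strand s.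
theorem lineRev_eq (bp s pos : Int) (hs : PySem.Int.mod s 2 = 1) :
    PySem.Int.toStr (s + 1) ++ " " ++ (if PySem.Int.mod pos 2 = 0 then "T" else "A") ++ " " ++
      PySem.Int.toStr (if pos = 0 then -1 else s * bp + pos - 1) ++ " " ++
      PySem.Int.toStr (if pos = bp - 1 then -1 else s * bp + pos + 1)
    = lineB bp s pos := by
  unfold lineB
  have hm : ∀ a : Int, PySem.Int.mod a 2 = a % 2 := fun a => PySem.Int.mod_eq_emod_of_pos (by omega)
  simp only [hm] at hs ⊢
  rw [ite_not]
  by_cases h : pos % 2 = 0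
  · rw [if_pos h, if_neg (show ¬((s + pos) % 2 = 0) by omega)]
  · rw [if_neg h, if_pos (show (s + pos) % 2 = 0 by omega)]

-- A's per-edge step (inline form of the outer-fold lambda of port A; defeq to it).
def edgeStep (bp : Int) (st : List String × Int) (edge_idx : Int) : List String × Int :=
  (PySem.List.pyRange 0 bp 1).foldl
    (fun (st : List String × Int) pos =>
      (st.1 ++ [PySem.Int.toStr (edge_idx * 2 + 2) ++ " " ++
                (if PySem.Int.mod pos 2 = 0 then "T" else "A") ++ " " ++
                PySem.Int.toStr (if pos = 0 then (-1 : Int) else st.2 - 1) ++ " " ++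
                PySem.Int.toStr (if pos = bp - 1 then (-1 : Int) else st.2 + 1)],
       st.2 + 1))
    ((PySem.List.pyRange 0 bp 1).foldl
      (fun (st : List String × Int) pos =>
        (st.1 ++ [PySem.Int.toStr (edge_idx * 2 + 1) ++ " " ++
                  (if PySem.Int.mod pos 2 = 0 then "A" else "T") ++ " " ++
                  PySem.Int.toStr (if pos = 0 then (-1 : Int) else st.2 - 1) ++ " " ++
                  PySem.Int.toStr (if pos = bp - 1 then (-1 : Int) else st.2 + 1)],
         st.2 + 1)) st)

theorem A_eq (routing : List (String × Int)) :
    generate_oxdna_topology routing =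
      PySem.Str.join "\n"
        (((PySem.List.pyRange 0 ((routing.lookup "num_edges").getD 0) 1).foldl
            (edgeStep ((routing.lookup "bp_per_edge").getD 0))
            ([PySem.Int.toStr ((routing.lookup "num_edges").getD 0 * 2 * ((routing.lookup "bp_per_edge").getD 0)) ++ " " ++
              PySem.Int.toStr ((routing.lookup "num_edges").getD 0 * 2)], 0)).1) := rfl

theorem edgeStep_eq (bp e : Int) (hbp : 0 < bp) (acc : List String) :
    edgeStep bp (acc, 2 * e * bp) e = (acc ++ blockB bp (2 * e) ++ blockB bp (2 * e + 1), 2 * (e + 1) * bp) := by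
  unfold edgeStep
  have hcast : ((bp.toNat : Int)) = bp := Int.toNat_of_nonneg (by omega)
  have h1 : (acc, 2 * e * bp) = (acc, 2 * e * bp + 0) := by ring_nf
  rw [h1, foldNid (fun pos nid => PySem.Int.toStr (e * 2 + 1) ++ " " ++
        (if PySem.Int.mod pos 2 = 0 then "A" else "T") ++ " " ++
        PySem.Int.toStr (if pos = 0 then (-1 : Int) else nid - 1) ++ " " ++
        PySem.Int.toStr (if pos = bp - 1 then (-1 : Int) else nid + 1))
      bp.toNat (2 * e * bp) 0 bp acc (by omega)]
  have h2 : 2 * e * bp + 0 + (bp.toNat : Int) = (2 * e + 1) * bp + 0 := by rw [hcast]; ring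
  rw [h2, foldNid (fun pos nid => PySem.Int.toStr (e * 2 + 2) ++ " " ++
        (if PySem.Int.mod pos 2 = 0 then "T" else "A") ++ " " ++
        PySem.Int.toStr (if pos = 0 then (-1 : Int) else nid - 1) ++ " " ++
        PySem.Int.toStr (if pos = bp - 1 then (-1 : Int) else nid + 1))
      bp.toNat ((2 * e + 1) * bp) 0 bp _ (by omega)]
  have hf : (PySem.List.pyRange 0 bp 1).map
      (fun pos => PySem.Int.toStr (e * 2 + 1) ++ " " ++
        (if PySem.Int.mod pos 2 = 0 then "A" else "T") ++ " " ++
        PySem.Int.toStr (if pos = 0 then (-1 : Int) else 2 * e * bp + pos - 1) ++ " " ++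
        PySem.Int.toStr (if pos = bp - 1 then (-1 : Int) else 2 * e * bp + pos + 1))
      = blockB bp (2 * e) := by
    unfold blockB
    apply List.map_congr_left
    intro pos _
    rw [← lineFwd_eq bp (2 * e) pos (by rw [PySem.Int.mod_eq_emod_of_pos (by omega)]; omega)]
    have he : e * 2 + 1 = 2 * e + 1 := by ring
    rw [he]
  have hr : (PySem.List.pyRange 0 bp 1).map
      (fun pos => PySem.Int.toStr (e * 2 + 2) ++ " " ++
        (if PySem.Int.mod pos 2 = 0 then "T" else "A") ++ " " ++
        PySem.Int.toStr (if pos = 0 then (-1 : Int) else (2 * e + 1) * bp + pos - 1) ++ " " ++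
        PySem.Int.toStr (if pos = bp - 1 then (-1 : Int) else (2 * e + 1) * bp + pos + 1))
      = blockB bp (2 * e + 1) := by
    unfold blockB
    apply List.map_congr_left
    intro pos _
    rw [← lineRev_eq bp (2 * e + 1) pos (by rw [PySem.Int.mod_eq_emod_of_pos (by omega)]; omega)]
    have he : e * 2 + 2 = 2 * e + 1 + 1 := by ring
    rw [he]
  rw [hf, hr, hcast]
  simp only [Prod.mk.injEq, List.append_assoc]
  exact ⟨trivial, by ring⟩

theorem pyRange_toNat (a : Int) : PySem.List.pyRange 0 a 1 = PySem.List.pyRange 0 ((a.toNat : Int)) 1 := by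
  rw [PySem.List.pyRange_one, PySem.List.pyRange_one]
  congr 2
  omega

theorem outerFold (bp : Int) (hbp : 0 < bp) :
    ∀ (k : Nat) (e ne : Int) (acc : List String), 0 ≤ e → (ne - e).toNat = k →
      (PySem.List.pyRange e ne 1).foldl (edgeStep bp) (acc, 2 * e * bp)
      = (acc ++ (PySem.List.pyRange e ne 1).flatMap (fun ei => blockB bp (2 * ei) ++ blockB bp (2 * ei + 1)),
         2 * (e + (k : Int)) * bp) := by
  intro k
  induction k with
  | zero =>
    intro e ne acc he h
    rw [PySem.List.pyRange_one_eq_nil (by omega)]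
    simp
  | succ k ih =>
    intro e ne acc he h
    rw [PySem.List.pyRange_one_cons (by omega)]
    simp only [List.foldl_cons, List.flatMap_cons]
    rw [edgeStep_eq bp e hbp acc]
    rw [ih (e + 1) ne _ (by omega) (by omega)]
    simp only [Prod.mk.injEq, List.append_assoc, true_and]
    push_cast; ring

theorem strandRange (f : Int → List String) :
    ∀ (k : Nat) (e : Int),
      (PySem.List.pyRange e (e + (k : Int)) 1).flatMap (fun ei => f (2 * ei) ++ f (2 * ei + 1))
      = (PySem.List.pyRange (2 * e) (2 * e + 2 * (k : Int)) 1).flatMap f := by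
  intro k
  induction k with
  | zero =>
    intro e
    rw [PySem.List.pyRange_one_eq_nil (by omega), PySem.List.pyRange_one_eq_nil (by omega)]
    rfl
  | succ k ih =>
    intro e
    rw [PySem.List.pyRange_one_cons (by omega), PySem.List.pyRange_one_cons (a := 2 * e) (by omega),
        PySem.List.pyRange_one_cons (a := 2 * e + 1) (by omega)]
    simp only [List.flatMap_cons]
    have h1 : e + ((k : Int) + 1) = (e + 1) + (k : Int) := by ring
    have h2 : 2 * e + 1 + 1 = 2 * (e + 1) := by ring
    have h3 : 2 * e + 2 * ((k : Int) + 1) = 2 * (e + 1) + 2 * (k : Int) := by ring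
    push_cast
    rw [h1, h2, h3, ih (e + 1)]
    simp [List.append_assoc]

theorem edgeStep_id (bp : Int) (hbp : bp ≤ 0) (st : List String × Int) (e : Int) :
    edgeStep bp st e = st := by
  unfold edgeStep
  rw [PySem.List.pyRange_one_eq_nil (by omega)]
  simp

theorem foldl_fix {α β : Type} (f : α → β → α) (h : ∀ a b, f a b = a) :
    ∀ (l : List β) (a : α), l.foldl f a = a := by
  intro l
  induction l with
  | nil => intro a; rfl
  | cons x xs ih => intro a; rw [List.foldl_cons, h]; exact ih a

-- A for positive bp: header :: one block per strand.
theorem A_main (b n : Int) (hb : 0 < b) (hdr : String) :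
    PySem.Str.join "\n" (((PySem.List.pyRange 0 n 1).foldl (edgeStep b) ([hdr], 0)).1)
    = PySem.Str.join "\n" (hdr :: (PySem.List.pyRange 0 (n * 2) 1).flatMap (blockB b)) := by
  have h := outerFold b hb n.toNat 0 n [hdr] (le_refl 0) (by omega)
  simp only [mul_zero, zero_mul, zero_add] at h
  rw [h]
  simp only [List.singleton_append]
  congr 1
  rw [pyRange_toNat n, pyRange_toNat (n * 2)]
  have hs := strandRange (blockB b) n.toNat 0
  simp only [zero_add, mul_zero] at hs
  rw [hs]
  have h2 : (((n * 2).toNat : Int)) = 2 * ((n.toNat : Int)) := by omega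
  rw [h2]

-- ---------- B-side: reduce the zipped columns to the same flatMap of blocks ----------

-- B's line formatter (the lambda of port B, named for the proofs).
def fmtLine (t : Int × Char × Int × Int) : String :=
  PySem.Int.toStr t.1 ++ " " ++ String.singleton t.2.1 ++ " " ++
  PySem.Int.toStr t.2.2.1 ++ " " ++ PySem.Int.toStr t.2.2.2

theorem zip4_nil_left {α β γ δ : Type} (b : List β) (c : List γ) (d : List δ) :
    zip4 ([] : List α) b c d = [] := by
  cases b <;> cases c <;> cases d <;> rfl

theorem zip4_append {α β γ δ : Type} :
    ∀ (a1 : List α) (b1 : List β) (c1 : List γ) (d1 : List δ)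
      (a2 : List α) (b2 : List β) (c2 : List γ) (d2 : List δ),
      b1.length = a1.length → c1.length = a1.length → d1.length = a1.length →
      zip4 (a1 ++ a2) (b1 ++ b2) (c1 ++ c2) (d1 ++ d2)
        = zip4 a1 b1 c1 d1 ++ zip4 a2 b2 c2 d2 := by
  intro a1
  induction a1 with
  | nil =>
    intro b1 c1 d1 a2 b2 c2 d2 hb hc hd
    rw [List.eq_nil_of_length_eq_zero hb, List.eq_nil_of_length_eq_zero hc,
        List.eq_nil_of_length_eq_zero hd]
    simp [zip4_nil_left]
  | cons x xs ih =>
    intro b1 c1 d1 a2 b2 c2 d2 hb hc hd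
    cases b1 with
    | nil => simp at hb
    | cons y ys =>
      cases c1 with
      | nil => simp at hc
      | cons z zs =>
        cases d1 with
        | nil => simp at hd
        | cons w ws =>
          simp only [List.cons_append, zip4, List.length_cons] at *
          rw [ih ys zs ws a2 b2 c2 d2 (by omega) (by omega) (by omega)]

theorem zip4_map_same {ι α β γ δ : Type} (f : ι → α) (g : ι → β) (h : ι → γ) (j : ι → δ) :
    ∀ (l : List ι),
      zip4 (l.map f) (l.map g) (l.map h) (l.map j) = l.map (fun x => (f x, g x, h x, j x)) := by
  intro l
  induction l with
  | nil => rfl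
  | cons x xs ih => simp only [List.map_cons, zip4, ih]

theorem zip4_flatMap {α β γ δ : Type} (F : Int → List α) (G : Int → List β)
    (H : Int → List γ) (J : Int → List δ) :
    ∀ (l : List Int),
      (∀ s ∈ l, (G s).length = (F s).length ∧ (H s).length = (F s).length ∧ (J s).length = (F s).length) →
      zip4 (l.flatMap F) (l.flatMap G) (l.flatMap H) (l.flatMap J)
        = l.flatMap (fun s => zip4 (F s) (G s) (H s) (J s)) := by
  intro l
  induction l with
  | nil => intro _; rfl
  | cons x xs ih =>
    intro hl
    simp only [List.flatMap_cons]
    rw [zip4_append (F x) (G x) (H x) (J x) _ _ _ _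
          (hl x (List.mem_cons_self)).1 (hl x (List.mem_cons_self)).2.1 (hl x (List.mem_cons_self)).2.2,
        ih (fun s hs => hl s (List.mem_cons_of_mem x hs))]

-- Range shift: pyRange a (a+k) is pyRange b (b+k) translated by a-b.
theorem pyRange_shift :
    ∀ (k : Nat) (a b : Int),
      PySem.List.pyRange a (a + (k : Int)) 1
        = (PySem.List.pyRange b (b + (k : Int)) 1).map (fun p => p + (a - b)) := by
  intro k
  induction k with
  | zero =>
    intro a b
    rw [PySem.List.pyRange_one_eq_nil (by omega), PySem.List.pyRange_one_eq_nil (by omega)]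
    rfl
  | succ k ih =>
    intro a b
    rw [PySem.List.pyRange_one_cons (by push_cast; omega),
        PySem.List.pyRange_one_cons (a := b) (by push_cast; omega)]
    simp only [List.map_cons]
    have h1 : a + ((k : Int) + 1) = (a + 1) + (k : Int) := by ring
    have h2 : b + ((k : Int) + 1) = (b + 1) + (k : Int) := by ring
    push_cast
    rw [h1, h2, ih (a + 1) (b + 1), show a + 1 - (b + 1) = a - b by ring]
    congr 1
    omega

-- Chunk a flat range into per-strand ranges of width bp.
theorem rangeChunk (bp : Int) (hbp : 0 < bp) :
    ∀ (k : Nat) (a : Int),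
      PySem.List.pyRange (a * bp) (a * bp + (k : Int) * bp) 1
        = (PySem.List.pyRange a (a + (k : Int)) 1).flatMap
            (fun s => PySem.List.pyRange (s * bp) ((s + 1) * bp) 1) := by
  intro k
  induction k with
  | zero =>
    intro a
    rw [PySem.List.pyRange_one_eq_nil (by omega), PySem.List.pyRange_one_eq_nil (by omega)]
    rfl
  | succ k ih =>
    intro a
    rw [show ((k + 1 : Nat) : Int) = (k : Int) + 1 by omega]
    rw [PySem.List.pyRange_one_cons (a := a) (b := a + ((k : Int) + 1)) (by omega)]
    simp only [List.flatMap_cons]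
    have hsplit : PySem.List.pyRange (a * bp) (a * bp + ((k : Int) + 1) * bp) 1
        = PySem.List.pyRange (a * bp) ((a + 1) * bp) 1 ++
          PySem.List.pyRange ((a + 1) * bp) (a * bp + ((k : Int) + 1) * bp) 1 := by
      apply PySem.List.pyRange_one_append
      · nlinarith
      · nlinarith [Int.mul_nonneg (Int.natCast_nonneg k) (le_of_lt hbp)]
    rw [hsplit]
    congr 1
    have h1 : a * bp + ((k : Int) + 1) * bp = (a + 1) * bp + (k : Int) * bp := by ring
    have h2 : a + ((k : Int) + 1) = (a + 1) + (k : Int) := by ring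
    rw [h1, h2, ih (a + 1)]

-- Tiling chars: take n of the flattened n-fold [x,y] pattern is the parity map.
theorem tile2 (x y : Char) :
    ∀ (k n : Nat), n ≤ 2 * k →
      ((List.replicate k [x, y]).flatten).take n
        = (List.range n).map (fun p => if p % 2 = 0 then x else y) := by
  intro k
  induction k with
  | zero =>
    intro n hn
    have : n = 0 := by omega
    subst this; rfl
  | succ k ih =>
    intro n hn
    simp only [List.replicate_succ, List.flatten_cons]
    match n with
    | 0 => rfl
    | 1 => rfl
    | (m + 2) =>
      simp only [List.cons_append, List.nil_append, List.take_succ_cons]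
      rw [ih m (by omega)]
      have hr : List.range (m + 2) = 0 :: 1 :: (List.range m).map (fun p => p + 1 + 1) := by
        rw [List.range_succ_eq_map, List.range_succ_eq_map]
        simp [List.map_map, Function.comp]
      rw [hr]
      simp only [List.map_cons, List.map_map]
      norm_num
      intro p _
      have hpp : (p + 1 + 1) % 2 = p % 2 := by omega
      rw [hpp]

-- The sliced tiling pattern as a parity map over pyRange.
theorem patEq (x y : Char) (bp : Int) (hbp : 0 < bp) :
    PySem.List.slice (PySem.List.pyRepeat [x, y] bp) none (some bp)
      = (PySem.List.pyRange 0 bp 1).map (fun p => if p % 2 = 0 then x else y) := by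
  rw [PySem.List.slice_to _ (by omega)]
  simp only [PySem.List.pyRepeat]
  rw [tile2 x y bp.toNat bp.toNat (by omega)]
  rw [pyRange_toNat bp, PySem.List.pyRange_zero_natCast]
  rw [List.map_map]
  apply List.map_congr_left
  intro p _
  simp only [Function.comp_apply]
  by_cases h : p % 2 = 0
  · rw [if_pos h, if_pos (show ((p : Int)) % 2 = 0 by omega)]
  · rw [if_neg h, if_neg (show ¬(((p : Int)) % 2 = 0) by omega)]

-- The bases column: ne copies of (pat ++ cpat) = per-strand parity chunks.
theorem basesChunks (bp : Int) :
    ∀ (k : Nat) (j : Int),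
      (List.replicate k
        (((PySem.List.pyRange 0 bp 1).map (fun p => if p % 2 = 0 then 'A' else 'T')) ++
         ((PySem.List.pyRange 0 bp 1).map (fun p => if p % 2 = 0 then 'T' else 'A')))).flatten
      = (PySem.List.pyRange (2 * j) (2 * j + 2 * (k : Int)) 1).flatMap
          (fun s => (PySem.List.pyRange 0 bp 1).map (fun p => if (s + p) % 2 = 0 then 'A' else 'T')) := by
  intro k
  induction k with
  | zero =>
    intro j
    rw [PySem.List.pyRange_one_eq_nil (a := 2 * j) (by omega)]
    rfl
  | succ k ih =>
    intro j
    rw [PySem.List.pyRange_one_cons (a := 2 * j) (by push_cast; omega),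
        PySem.List.pyRange_one_cons (a := 2 * j + 1) (by push_cast; omega)]
    simp only [List.replicate_succ, List.flatten_cons, List.flatMap_cons]
    have hev : ((PySem.List.pyRange 0 bp 1).map (fun p => if (2 * j + p) % 2 = 0 then 'A' else 'T'))
        = (PySem.List.pyRange 0 bp 1).map (fun p => if p % 2 = 0 then 'A' else 'T') := by
      apply List.map_congr_left
      intro p _
      have : (2 * j + p) % 2 = p % 2 := by omega
      rw [this]
    have hodd : ((PySem.List.pyRange 0 bp 1).map (fun p => if (2 * j + 1 + p) % 2 = 0 then 'A' else 'T'))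
        = (PySem.List.pyRange 0 bp 1).map (fun p => if p % 2 = 0 then 'T' else 'A') := by
      apply List.map_congr_left
      intro p _
      by_cases h : p % 2 = 0
      · rw [if_pos h, if_neg (show ¬((2 * j + 1 + p) % 2 = 0) by omega)]
      · rw [if_neg h, if_pos (show (2 * j + 1 + p) % 2 = 0 by omega)]
    rw [hev, hodd]
    have h1 : 2 * j + 1 + 1 = 2 * (j + 1) := by ring
    have h2 : 2 * j + 2 * ((k : Nat) + 1 : Int) = 2 * (j + 1) + 2 * (k : Int) := by omega
    push_cast
    rw [h1, h2, ih (j + 1)]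
    simp [List.append_assoc]

-- One zipped per-strand chunk, formatted, is exactly blockB.
theorem chunk_eq_blockB (bp s : Int) (hbp : 0 < bp) :
    (PySem.List.pyRange 0 bp 1).map (fun p =>
      fmtLine (s + 1,
               (if (s + p) % 2 = 0 then 'A' else 'T'),
               (if PySem.Int.mod (p + s * bp) bp = 0 then (-1 : Int) else (p + s * bp) - 1),
               (if PySem.Int.mod (p + s * bp) bp = bp - 1 then (-1 : Int) else (p + s * bp) + 1)))
    = blockB bp s := by
  unfold blockB
  apply List.map_congr_left
  intro p hp
  have hpb : 0 ≤ p ∧ p < bp := (PySem.List.mem_pyRange_one).mp hp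
  unfold fmtLine lineB
  have hmod : PySem.Int.mod (p + s * bp) bp = p := by
    rw [PySem.Int.mod_eq_emod_of_pos hbp, show s * bp = bp * s by ring,
        Int.add_mul_emod_self_left, Int.emod_eq_of_lt hpb.1 hpb.2]
  have hm2 : PySem.Int.mod (s + p) 2 = (s + p) % 2 := PySem.Int.mod_eq_emod_of_pos (by omega)
  rw [hmod, hm2]
  have hbase : String.singleton (if (s + p) % 2 = 0 then 'A' else 'T')
      = (if (s + p) % 2 = 0 then "A" else "T") := by split_ifs <;> rfl
  have h3 : (if p = 0 then (-1 : Int) else (p + s * bp) - 1)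
      = (if p ≠ 0 then s * bp + p - 1 else -1) := by
    rw [ite_not]; split_ifs <;> ring_nf
  have h5 : (if p = bp - 1 then (-1 : Int) else (p + s * bp) + 1)
      = (if p = bp - 1 then -1 else s * bp + p + 1) := by
    split_ifs <;> ring_nf
  simp only [hbase, h3, h5]

-- B unfolded to header :: formatted zip of the four columns.
theorem B_eq (routing : List (String × Int)) :
    generate_oxdna_topology_alt routing =
      PySem.Str.join "\n"
        ((PySem.Int.toStr ((routing.lookup "num_edges").getD 0 * 2 * ((routing.lookup "bp_per_edge").getD 0)) ++ " " ++
          PySem.Int.toStr ((routing.lookup "num_edges").getD 0 * 2)) ::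
          (zip4
            ((PySem.List.pyRange 1 ((routing.lookup "num_edges").getD 0 * 2 + 1) 1).flatMap
              (fun s => (PySem.List.pyRange 0 ((routing.lookup "bp_per_edge").getD 0) 1).map (fun _ => s)))
            (PySem.List.pyRepeat
              (PySem.List.slice (PySem.List.pyRepeat "AT".toList ((routing.lookup "bp_per_edge").getD 0)) none (some ((routing.lookup "bp_per_edge").getD 0)) ++
               PySem.List.slice (PySem.List.pyRepeat "TA".toList ((routing.lookup "bp_per_edge").getD 0)) none (some ((routing.lookup "bp_per_edge").getD 0)))
              ((routing.lookup "num_edges").getD 0))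
            ((PySem.List.pyRange 0 ((routing.lookup "num_edges").getD 0 * 2 * ((routing.lookup "bp_per_edge").getD 0)) 1).map
              (fun i => if PySem.Int.mod i ((routing.lookup "bp_per_edge").getD 0) = 0 then (-1 : Int) else i - 1))
            ((PySem.List.pyRange 0 ((routing.lookup "num_edges").getD 0 * 2 * ((routing.lookup "bp_per_edge").getD 0)) 1).map
              (fun i => if PySem.Int.mod i ((routing.lookup "bp_per_edge").getD 0) = ((routing.lookup "bp_per_edge").getD 0) - 1 then (-1 : Int) else i + 1))).map fmtLine) := rfl

-- B's formatted zip equals the flatMap of blocks (positive bp).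
theorem B_main (bp ne : Int) (hbp : 0 < bp) :
    (zip4
        ((PySem.List.pyRange 1 (ne * 2 + 1) 1).flatMap
          (fun s => (PySem.List.pyRange 0 bp 1).map (fun _ => s)))
        (PySem.List.pyRepeat
          (PySem.List.slice (PySem.List.pyRepeat "AT".toList bp) none (some bp) ++
           PySem.List.slice (PySem.List.pyRepeat "TA".toList bp) none (some bp)) ne)
        ((PySem.List.pyRange 0 (ne * 2 * bp) 1).map
          (fun i => if PySem.Int.mod i bp = 0 then (-1 : Int) else i - 1))
        ((PySem.List.pyRange 0 (ne * 2 * bp) 1).map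
          (fun i => if PySem.Int.mod i bp = bp - 1 then (-1 : Int) else i + 1))).map fmtLine
    = (PySem.List.pyRange 0 (ne * 2) 1).flatMap (blockB bp) := by
  by_cases hne : ne < 0
  · -- negative edge count: the strand column is empty, so the zip is empty; so is the range.
    have hs : PySem.List.pyRange 1 (ne * 2 + 1) 1 = [] := PySem.List.pyRange_one_eq_nil (by omega)
    rw [hs, PySem.List.pyRange_one_eq_nil (b := ne * 2) (by omega)]
    simp [zip4_nil_left]
  · rw [Int.not_lt] at hne
    set ns := ne * 2 with hns
    have hns0 : 0 ≤ ns := by omega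
    -- strand column
    have hstr : (PySem.List.pyRange 1 (ns + 1) 1).flatMap
          (fun s => (PySem.List.pyRange 0 bp 1).map (fun _ => s))
        = (PySem.List.pyRange 0 ns 1).flatMap
            (fun s => (PySem.List.pyRange 0 bp 1).map (fun _ => s + 1)) := by
      have h1 : PySem.List.pyRange 1 (ns + 1) 1
          = (PySem.List.pyRange 0 ns 1).map (fun p => p + 1) := by
        have := pyRange_shift ns.toNat 1 0
        simp only [Int.toNat_of_nonneg hns0] at this
        rw [show (1 : Int) + ns = ns + 1 by ring, show (0 : Int) + ns = ns by ring] at this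
        simpa using this
      rw [h1, List.flatMap_map]
    -- bases column
    have hbas : PySem.List.pyRepeat
          (PySem.List.slice (PySem.List.pyRepeat "AT".toList bp) none (some bp) ++
           PySem.List.slice (PySem.List.pyRepeat "TA".toList bp) none (some bp)) ne
        = (PySem.List.pyRange 0 ns 1).flatMap
            (fun s => (PySem.List.pyRange 0 bp 1).map (fun p => if (s + p) % 2 = 0 then 'A' else 'T')) := by
      have hAT : ("AT".toList) = ['A', 'T'] := rfl
      have hTA : ("TA".toList) = ['T', 'A'] := rfl
      rw [hAT, hTA, patEq 'A' 'T' bp hbp, patEq 'T' 'A' bp hbp]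
      simp only [PySem.List.pyRepeat]
      have := basesChunks bp ne.toNat 0
      simp only [mul_zero, zero_add] at this
      rw [this]
      congr 2
      omega
    -- neighbor columns: chunk the flat range, then shift each chunk.
    have hchunk : PySem.List.pyRange 0 (ns * bp) 1
        = (PySem.List.pyRange 0 ns 1).flatMap
            (fun s => (PySem.List.pyRange 0 bp 1).map (fun p => p + s * bp)) := by
      have h1 := rangeChunk bp hbp ns.toNat 0
      simp only [zero_mul, zero_add] at h1
      have hnsbp : 0 ≤ ns * bp := mul_nonneg hns0 (le_of_lt hbp)
      rw [pyRange_toNat (ns * bp), show ((ns * bp).toNat : Int) = ((ns.toNat : Int)) * bp by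
            rw [Int.toNat_of_nonneg hns0]; omega,
          h1, ← Int.toNat_of_nonneg hns0]
      apply List.flatMap_congr
      intro s _
      have h2 := pyRange_shift bp.toNat (s * bp) 0
      simp only [Int.toNat_of_nonneg (le_of_lt hbp)] at h2
      rw [show (s + 1) * bp = s * bp + bp by ring, h2, show (0 : Int) + bp = bp by ring]
      simp
    have hn3 : (PySem.List.pyRange 0 (ne * 2 * bp) 1).map
          (fun i => if PySem.Int.mod i bp = 0 then (-1 : Int) else i - 1)
        = (PySem.List.pyRange 0 ns 1).flatMap
            (fun s => (PySem.List.pyRange 0 bp 1).map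
              (fun p => if PySem.Int.mod (p + s * bp) bp = 0 then (-1 : Int) else (p + s * bp) - 1)) := by
      rw [show ne * 2 * bp = ns * bp from rfl, hchunk, List.map_flatMap]
      apply List.flatMap_congr
      intro s _
      rw [List.map_map]
      rfl
    have hn5 : (PySem.List.pyRange 0 (ne * 2 * bp) 1).map
          (fun i => if PySem.Int.mod i bp = bp - 1 then (-1 : Int) else i + 1)
        = (PySem.List.pyRange 0 ns 1).flatMap
            (fun s => (PySem.List.pyRange 0 bp 1).map
              (fun p => if PySem.Int.mod (p + s * bp) bp = bp - 1 then (-1 : Int) else (p + s * bp) + 1)) := by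
      rw [show ne * 2 * bp = ns * bp from rfl, hchunk, List.map_flatMap]
      apply List.flatMap_congr
      intro s _
      rw [List.map_map]
      rfl
    rw [hstr, hbas, hn3, hn5]
    rw [zip4_flatMap _ _ _ _ _ (by intro s _; simp)]
    rw [List.map_flatMap]
    apply List.flatMap_congr
    intro s _
    rw [zip4_map_same, List.map_map]
    exact chunk_eq_blockB bp s hbp

-- ===== VERDICT (by name: the statement is the Claim_ definition above) =====
theorem generate_oxdna_topology_spec : Claim_equal_generate_oxdna_topology := by
  intro routing _ _
  unfold Spec_generate_oxdna_topology
  rw [A_eq, B_eq]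
  by_cases hbp : 0 < (routing.lookup "bp_per_edge").getD 0
  · rw [B_main _ _ hbp]
    exact A_main _ _ hbp _
  · rw [Int.not_lt] at hbp
    rw [foldl_fix _ (fun a b => edgeStep_id _ hbp a b)]
    have hcol : (PySem.List.pyRange 0 ((routing.lookup "bp_per_edge").getD 0) 1) = [] :=
      PySem.List.pyRange_one_eq_nil (by omega)
    simp only [hcol, PySem.List.pyRepeat, List.map_nil]
    rw [List.flatMap_eq_nil_iff.mpr (fun x _ => rfl), zip4_nil_left]
    rfl
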